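-- pv_equiv track=rewrite | github.com/rsvarma/generation-model-analyzer | src/utils/modelutils.py | join_words
-- ===== SOURCE A (Python) =====
-- def remove_contraction_spaces(string):
--     new_str = ''
--     for i in range(len(string)):
--         if string[i] == "'" and i+1 < len(string) and string[i+1].isalpha():
--             new_str = new_str[:-1]+string[i]
--         else:
--             new_str += string[i]
--     return new_str
--
-- def join_words(words):
--     string = ""
--     for idx,word in enumerate(words):
--         if word == "." or word == "," or word == "?" or word == "!" or word == "'s":
--             string = string[:-1]+word+" "
--         elif word == "-":
--             string = string[:-1]+word
--         elif idx == len(words)-1: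
--             string += word
--         else:
--             string += word+" "
--     if string[-1] == " ":
--         string = string[:-1]
--     string = remove_contraction_spaces(string)
--     return string
-- ===== SOURCE B (Python) =====
-- def join_words(words):
--     # state machine over a character buffer: sp = "a separator space is pending"
--     buf = []
--     sp = False
--     n = len(words)
--     for idx, word in enumerate(words):
--         if word in (".", ",", "?", "!", "'s"):
--             if not sp and buf:
--                 buf.pop()
--             buf.extend(word)
--             sp = True
--         elif word == "-":
--             if not sp and buf:
--                 buf.pop()
--             buf.extend(word)
--             sp = False
--         else:
--             if sp:
--                 buf.append(" ")
--             buf.extend(word)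
--             sp = idx != n - 1
--     if not sp and buf and buf[-1] == " ":
--         buf.pop()
--     # contraction fix: drop any character that directly precedes an
--     # apostrophe followed by a letter (one filtering pass with lookahead)
--     return "".join(
--         c for i, c in enumerate(buf)
--         if not (i + 2 < len(buf) and buf[i + 1] == "'" and buf[i + 2].isalpha())
--     )
-- ===== Notes on version B (the rewrite author's own statement) =====
-- stated objective: alternative
-- what changed: The join loop becomes a (char-buffer, pending-space) state machine instead of A's append-a-space-then-slice-it-back string edits, and the contraction pass becomes a single lookahead filter over enumerate(buf) (keep a char unless it directly precedes an apostrophe followed by a letter) instead of A's build-and-retruncate character loop.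
-- outside the precondition, e.g. on join_words([]): A raises IndexError, B returns ''; on join_words(['']): A raises IndexError, B returns ''
import Mathlib
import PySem

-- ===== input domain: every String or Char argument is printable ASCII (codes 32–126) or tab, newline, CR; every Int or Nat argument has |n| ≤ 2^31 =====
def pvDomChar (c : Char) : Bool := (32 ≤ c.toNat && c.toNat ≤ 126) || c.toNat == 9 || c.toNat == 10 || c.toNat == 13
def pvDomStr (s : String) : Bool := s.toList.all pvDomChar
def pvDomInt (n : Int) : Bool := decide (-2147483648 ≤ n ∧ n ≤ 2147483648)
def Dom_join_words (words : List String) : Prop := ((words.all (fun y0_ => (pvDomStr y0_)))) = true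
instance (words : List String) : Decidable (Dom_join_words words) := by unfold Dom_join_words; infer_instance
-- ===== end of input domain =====

-- B rebuilds the join as a (char-buffer, pending-space) state machine and the contraction
-- pass as a single lookahead filter, instead of A's slice-and-retruncate string edits
-- (objective: alternative decomposition; equivalence is about the return value).

-- ===== PORT A =====
-- remove_contraction_spaces: loop over i in range(len(string)); new_str[:-1] is
-- PySem.List.slice … (some (-1)); string[i+1].isalpha() is strIsalpha on the 1-char string.
def rcsA_step (s : List Char) (new : List Char) (i : Nat) : List Char :=
  match s[i]? with
  | some c =>
      if (c == '\'') && (decide (i + 1 < s.length)) &&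
         (match s[i+1]? with | some d => PySem.Chars.strIsalpha [d] | none => false) then
        PySem.List.slice new none (some (-1)) ++ [c]
      else
        new ++ [c]
  | none => new   -- unreachable: i < s.length

def remove_contraction_spacesA (s : List Char) : List Char :=
  (List.range s.length).foldl (rcsA_step s) []

-- the body of A's for-loop over enumerate(words); n = len(words)
def jwStepA (n : Nat) (acc : List Char) (p : String × Nat) : List Char :=
  if p.1 = "." ∨ p.1 = "," ∨ p.1 = "?" ∨ p.1 = "!" ∨ p.1 = "'s" then
    PySem.List.slice acc none (some (-1)) ++ p.1.toList ++ [' ']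
  else if p.1 = "-" then
    PySem.List.slice acc none (some (-1)) ++ p.1.toList
  else if p.2 = n - 1 then
    acc ++ p.1.toList
  else
    acc ++ p.1.toList ++ [' ']

def join_words (words : List String) : String :=
  let s := (words.zipIdx).foldl (jwStepA words.length) []
  let s2 :=
    match PySem.List.pyGet? s (-1) with   -- string[-1]; none = IndexError (excluded by Pre_)
    | some c => if c = ' ' then PySem.List.slice s none (some (-1)) else s
    | none => s
  String.mk (remove_contraction_spacesA s2)

-- ===== PORT B =====
-- Source B's loop body: state (buf, sp) with sp = "a separator space is pending";
-- "if not sp and buf: buf.pop()" followed by extend is ported as dropLast ++ (exact: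
-- pop is only guarded against the empty buffer, and dropLast [] = []).
def jwStepB (n : Nat) (st : List Char × Bool) (p : String × Nat) : List Char × Bool :=
  if p.1 = "." ∨ p.1 = "," ∨ p.1 = "?" ∨ p.1 = "!" ∨ p.1 = "'s" then
    ((if st.2 then st.1 else st.1.dropLast) ++ p.1.toList, true)
  else if p.1 = "-" then
    ((if st.2 then st.1 else st.1.dropLast) ++ p.1.toList, false)
  else
    ((if st.2 then st.1 ++ [' '] else st.1) ++ p.1.toList, decide (p.2 ≠ n - 1))

def join_words_alt (words : List String) : String :=
  let st := (words.zipIdx).foldl (jwStepB words.length) ([], false)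
  -- "if not sp and buf and buf[-1] == ' ': buf.pop()"; buf[-1] of a nonempty buf is getLast?
  let out := if st.2 then st.1
             else if st.1.getLast? == some ' ' then st.1.dropLast else st.1
  -- "".join(c for i,c in enumerate(out) if not (i+2 < len(out) and out[i+1] == "'" and out[i+2].isalpha()))
  String.mk
    (((out.zipIdx).filter (fun q =>
        !((decide (q.2 + 2 < out.length)) && (out[q.2+1]? == some '\'') &&
          (match out[q.2+2]? with | some d => PySem.Chars.strIsalpha [d] | none => false)))).map
      Prod.fst)

-- ===== PRECONDITION & SPEC =====
-- Pre_ excludes exactly the inputs [] and [""], the only inputs on which A's joined string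
-- is empty so that string[-1] raises IndexError (B returns "" there).
def Pre_join_words (words : List String) : Prop := words ≠ [] ∧ words ≠ [""]
instance (words : List String) : Decidable (Pre_join_words words) := by
  unfold Pre_join_words; infer_instance

def pvWitness_join_words : List String := ["hello", ",", "the", "dog", "'s", "toy", "-", "box", "!"]

def Spec_join_words (words : List String) (out : String) : Prop := out = join_words_alt words
instance (words : List String) (out : String) : Decidable (Spec_join_words words out) := by
  unfold Spec_join_words; infer_instance

-- ===== CLAIM (what is proved, stated in full; the proofs are below) =====
def Claim_equal_join_words : Prop :=
  ∀ (words : List String), Dom_join_words words → Pre_join_words words →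
    Spec_join_words words (join_words words)

-- ===== LEMMAS AND PROOFS =====

-- sep sp = the trailing " " A's string carries exactly when B's pending flag is set
def pvSep (sp : Bool) : List Char := if sp then [' '] else []

theorem pvJoinInv (n : Nat) (l : List String) :
    ∀ (k : Nat) (s : List Char) (sp : Bool),
      (l.zipIdx k).foldl (jwStepA n) (s ++ pvSep sp) =
        (fun t : List Char × Bool => t.1 ++ pvSep t.2) ((l.zipIdx k).foldl (jwStepB n) (s, sp)) := by
  induction l with
  | nil => intro k s sp; simp
  | cons a l ih =>
    intro k s sp
    rw [List.zipIdx_cons]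
    simp only [List.foldl_cons]
    have hdrop : (s ++ pvSep sp).dropLast = if sp then s else s.dropLast := by
      cases sp <;> simp [pvSep]
    by_cases h1 : a = "." ∨ a = "," ∨ a = "?" ∨ a = "!" ∨ a = "'s"
    · have hA : jwStepA n (s ++ pvSep sp) (a, k) =
          ((if sp then s else s.dropLast) ++ a.toList) ++ pvSep true := by
        cases sp <;> simp [jwStepA, h1, PySem.List.slice_to_neg_one, pvSep]
      rw [hA, ih]
      simp [jwStepB, h1]
    · by_cases h2 : a = "-"
      · have hA : jwStepA n (s ++ pvSep sp) (a, k) =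
            ((if sp then s else s.dropLast) ++ a.toList) ++ pvSep false := by
          cases sp <;> simp [jwStepA, h2, PySem.List.slice_to_neg_one, pvSep]
        rw [hA, ih]
        simp [jwStepB, h2]
      · by_cases h3 : k = n - 1
        · have hA : jwStepA n (s ++ pvSep sp) (a, k) =
              ((if sp then s ++ [' '] else s) ++ a.toList) ++ pvSep false := by
            cases sp <;> simp [jwStepA, h1, h2, h3, pvSep]
          rw [hA, ih]
          simp [jwStepB, h1, h2, h3]
        · have hA : jwStepA n (s ++ pvSep sp) (a, k) =
              ((if sp then s ++ [' '] else s) ++ a.toList) ++ pvSep true := by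
            cases sp <;> simp [jwStepA, h1, h2, h3, pvSep]
          rw [hA, ih]
          simp [jwStepB, h1, h2, h3]

-- A's loop condition at index i, with the bounds folded into the optional lookups
def pvMatch (s : List Char) (i : Nat) : Bool :=
  (s[i]? == some '\'') &&
    (match s[i+1]? with | some d => PySem.Chars.strIsalpha [d] | none => false)

-- the final `keep` filter on the first i characters
def pvKeep (s : List Char) (i : Nat) : List Char :=
  (List.range i).filterMap (fun j => if pvMatch s (j+1) then none else s[j]?)

theorem pvTakeDrop (s : List Char) (j : Nat) :
    (s.take (j+1)).drop j = (s[j]?).toList := by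
  rcases Nat.lt_or_ge j s.length with h | h
  · have hl : (s.take j).length = j := by simp [h.le]
    have hd : List.drop (s.take j).length (s.take j ++ (s[j]?).toList) = (s[j]?).toList :=
      List.drop_left
    rw [hl] at hd
    rw [List.take_succ, hd]
  · rw [List.getElem?_eq_none h]
    exact List.drop_eq_nil_of_le (by simp; omega)

theorem pvRcsA_eq (s : List Char) :
    remove_contraction_spacesA s =
      (List.range s.length).filterMap (fun j => if pvMatch s (j+1) then none else s[j]?) := by
  have key : ∀ i, i ≤ s.length →
      (List.range i).foldl (rcsA_step s) [] =
        pvKeep s i ++ (if pvMatch s i then (s.take i).drop (i-1) else []) := by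
    intro i
    induction i with
    | zero => intro _; simp [pvKeep, pvMatch]
    | succ i ih =>
      intro hle
      have hi : i < s.length := by omega
      obtain ⟨c, hc⟩ : ∃ c, s[i]? = some c := ⟨s[i], List.getElem?_eq_getElem hi⟩
      rw [List.range_succ, List.foldl_append, List.foldl_cons, List.foldl_nil, ih (by omega)]
      have hKsucc : pvKeep s (i+1) =
          pvKeep s i ++ (if pvMatch s (i+1) then [] else [c]) := by
        cases hpm : pvMatch s (i+1) <;>
          simp [pvKeep, List.range_succ, List.filterMap_append, hc, hpm]
      have hcond : ((c == '\'') && (decide (i + 1 < s.length)) &&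
          (match s[i+1]? with | some d => PySem.Chars.strIsalpha [d] | none => false)) =
          pvMatch s i := by
        cases h2 : s[i+1]? with
        | none => simp [pvMatch, hc, h2]
        | some d =>
          obtain ⟨hlt, hgd⟩ := List.getElem?_eq_some_iff.mp h2
          simp [pvMatch, hc, hlt, hgd]
      cases hm : pvMatch s i with
      | true =>
        have hc' : c = '\'' := by
          have := hm
          simp [pvMatch, hc] at this
          exact this.1
        obtain ⟨d, hd, hda⟩ : ∃ d, s[i+1]? = some d ∧ PySem.Chars.strIsalpha [d] = true := by
          have := hm
          simp [pvMatch, hc] at this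
          rcases this with ⟨_, h⟩
          cases h2 : s[i+1]? with
          | none => rw [h2] at h; simp at h
          | some d => rw [h2] at h; exact ⟨d, rfl, h⟩
        have hne : pvMatch s (i+1) = false := by
          simp [pvMatch, hd]
          intro he
          exact absurd hda (by rw [he]; decide)
        rw [hKsucc, hne]
        simp only [rcsA_step, hc, hcond, hm, if_true]
        cases i with
        | zero => simp [pvKeep, PySem.List.slice_to_neg_one, hc']
        | succ j =>
          have hj : j < s.length := by omega
          obtain ⟨e, he⟩ : ∃ e, s[j]? = some e := ⟨s[j], List.getElem?_eq_getElem hj⟩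
          simp [pvTakeDrop, he, PySem.List.slice_to_neg_one]
      | false =>
        rw [hKsucc]
        simp only [rcsA_step, hc, hcond, hm, if_false, Bool.false_eq_true]
        cases hm1 : pvMatch s (i+1) with
        | true => simp [pvTakeDrop, hc]
        | false => simp
  have := key s.length le_rfl
  have hend : pvMatch s s.length = false := by
    simp [pvMatch]
  rw [remove_contraction_spacesA, this, hend]
  simp [pvKeep]

theorem pvZipFilter (s : List Char) (p : Nat → Bool) :
    ∀ k : Nat, (((s.zipIdx k).filter (fun q => p q.2)).map Prod.fst) =
      (List.range s.length).filterMap (fun j => if p (j + k) then s[j]? else none) := by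
  induction s with
  | nil => intro k; simp
  | cons a t ih =>
    intro k
    rw [List.zipIdx_cons]
    simp only [List.length_cons]
    rw [List.range_succ_eq_map, List.filterMap_cons, List.filterMap_map]
    have hshift : (List.range t.length).filterMap
        ((fun j => if p (j + k) then (a :: t)[j]? else none) ∘ Nat.succ) =
        (List.range t.length).filterMap (fun j => if p (j + (k+1)) then t[j]? else none) := by
      congr 1
      funext j
      simp only [Function.comp_apply, List.getElem?_cons_succ]
      rw [show Nat.succ j + k = j + (k+1) from by omega]
    rw [hshift]
    by_cases hp : p k
    · simp [hp, ih (k+1)]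
    · simp [hp, ih (k+1)]

-- B's filter over enumerate(out) computes the same `keep` filter
theorem pvBfilter (out : List Char) :
    (((out.zipIdx).filter (fun q =>
        !((decide (q.2 + 2 < out.length)) && (out[q.2+1]? == some '\'') &&
          (match out[q.2+2]? with | some d => PySem.Chars.strIsalpha [d] | none => false)))).map
      Prod.fst) =
      (List.range out.length).filterMap (fun j => if pvMatch out (j+1) then none else out[j]?) := by
  have h1 := pvZipFilter out (fun i =>
      !((decide (i + 2 < out.length)) && (out[i+1]? == some '\'') &&
        (match out[i+2]? with | some d => PySem.Chars.strIsalpha [d] | none => false))) 0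
  have h2 : (List.range out.length).filterMap (fun j =>
        if !((decide (j + 0 + 2 < out.length)) && (out[j+0+1]? == some '\'') &&
          (match out[j+0+2]? with | some d => PySem.Chars.strIsalpha [d] | none => false))
        then out[j]? else none) =
      (List.range out.length).filterMap
        (fun j => if pvMatch out (j+1) then none else out[j]?) := by
    congr 1
    funext j
    simp only [Nat.add_zero]
    have hc : ((decide (j + 2 < out.length)) && (out[j+1]? == some '\'') &&
        (match out[j+2]? with | some d => PySem.Chars.strIsalpha [d] | none => false)) =
        pvMatch out (j+1) := by
      cases h2 : out[j+2]? with
      | none => simp [pvMatch, h2]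
      | some d =>
        obtain ⟨hlt, hgd⟩ := List.getElem?_eq_some_iff.mp h2
        simp [pvMatch, hlt, hgd]
    rw [hc]
    cases pvMatch out (j+1) <;> simp
  exact h1.trans h2

-- the final one-space strip: A's string[-1] test against B's endswith test
theorem pvStrip (sB : List Char) (spB : Bool) :
    (match PySem.List.pyGet? (sB ++ pvSep spB) (-1) with
      | some c => if c = ' ' then PySem.List.slice (sB ++ pvSep spB) none (some (-1))
                  else sB ++ pvSep spB
      | none => sB ++ pvSep spB) =
      (if spB then sB else if sB.getLast? == some ' ' then sB.dropLast else sB) := by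
  cases spB with
  | true =>
    simp [pvSep, PySem.List.pyGet?_neg_one, PySem.List.slice_to_neg_one]
  | false =>
    simp only [pvSep, if_neg (by simp : ¬(false = true)), List.append_nil]
    rcases List.eq_nil_or_concat sB with rfl | ⟨l, c, rfl⟩
    · simp [PySem.List.pyGet?_neg_one]
    · simp only [List.concat_eq_append]
      rw [PySem.List.pyGet?_neg_one, List.getLast?_concat]
      by_cases hcs : c = ' '
      · subst hcs
        simp [PySem.List.slice_to_neg_one]
      · simp [hcs]

-- ===== VERDICT (by name: the statement is the Claim_ definition above) =====
theorem join_words_spec : Claim_equal_join_words := by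
  intro words _ _
  unfold Spec_join_words join_words join_words_alt
  rcases hst : (words.zipIdx).foldl (jwStepB words.length) ([], false) with ⟨sB, spB⟩
  have h := pvJoinInv words.length words 0 [] false
  rw [hst] at h
  have hsep : pvSep false = [] := rfl
  have h' : List.foldl (jwStepA words.length) [] words.zipIdx = sB ++ pvSep spB := by
    simpa [hsep] using h
  dsimp only
  rw [h']
  rw [pvStrip sB spB]
  rw [pvRcsA_eq, pvBfilter]
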